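-- pv_equiv track=rewrite | github.com/hyeokjulee/programmers | python/귤고르기.py | solution
-- ===== SOURCE A (Python) =====
-- def solution(k, tangerine):
--     nums_dict = {}
--     for t in tangerine:
--         if t in nums_dict.keys():
--             nums_dict[t] += 1
--         else:
--             nums_dict[t] = 1
--
--     nums_list = list(nums_dict.items())
--     nums_list.sort(reverse=True, key=lambda x:x[1])
--
--     cnt = 0
--     for i in range(len(nums_list)):
--         if k <= 0:
--             break
--         else:
--             k -= nums_list[i][1]
--             cnt += 1
--
--     return cnt
-- ===== SOURCE B (Python) =====
-- def solution(k, tangerine):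
--     counts = {}
--     for t in tangerine:
--         counts[t] = counts.get(t, 0) + 1
--     bucket = {}
--     for f in counts.values():
--         bucket[f] = bucket.get(f, 0) + 1
--     cnt = 0
--     for f in sorted(bucket, reverse=True):
--         if k <= 0:
--             break
--         m = bucket[f]
--         need = (k + f - 1) // f
--         take = m if m < need else need
--         cnt += take
--         k -= take * f
--     return cnt
-- ===== Notes on version B (the rewrite author's own statement) =====
-- stated objective: alternative
-- what changed: B buckets the per-size counts by frequency and walks only the sorted distinct frequencies, taking each bucket in one ceil-division chunk, instead of A's sort of all (size,count) pairs followed by one loop iteration per distinct size.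
import Mathlib
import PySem

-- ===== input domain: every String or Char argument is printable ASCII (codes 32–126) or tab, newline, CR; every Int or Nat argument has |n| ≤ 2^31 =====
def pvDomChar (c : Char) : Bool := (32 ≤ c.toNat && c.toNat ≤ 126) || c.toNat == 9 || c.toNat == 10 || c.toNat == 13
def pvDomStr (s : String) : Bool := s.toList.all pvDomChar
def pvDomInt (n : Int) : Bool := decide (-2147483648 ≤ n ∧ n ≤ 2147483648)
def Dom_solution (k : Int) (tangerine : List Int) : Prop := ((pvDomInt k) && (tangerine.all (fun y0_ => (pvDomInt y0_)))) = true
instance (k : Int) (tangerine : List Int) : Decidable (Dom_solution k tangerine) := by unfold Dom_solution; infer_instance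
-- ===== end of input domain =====

-- B counts sizes into a dict, buckets those counts by frequency, sorts only the distinct
-- frequencies descending and takes each bucket in one ceil-division chunk, instead of A's
-- sort of all (size, count) pairs and one loop iteration per distinct size (alternative).

-- ===== PORT A =====
def solution (k : Int) (tangerine : List Int) : Int :=
  let numsDict := tangerine.foldl
    (fun (d : PySem.Dict Int Int) t =>
      if d.contains t then d.modify t 0 (· + 1) else d.insert t 1)
    PySem.Dict.empty
  let numsList := PySem.List.sorted numsDict.items (fun x => x.2) true
  let res := (PySem.List.pyRange 0 (PySem.List.len numsList) 1).foldl
    (fun (st : Int × Int × Bool) i =>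
      if st.2.2 then st
      else if st.1 ≤ 0 then (st.1, st.2.1, true)
      else (st.1 - (PySem.List.pyGetD numsList i (0, 0)).2, st.2.1 + 1, false))
    (k, 0, false)
  res.2.1

-- ===== PORT B =====
def solution_alt (k : Int) (tangerine : List Int) : Int :=
  let counts := tangerine.foldl
    (fun (d : PySem.Dict Int Int) t => d.insert t (d.getD t 0 + 1)) PySem.Dict.empty
  let bucket := counts.values.foldl
    (fun (d : PySem.Dict Int Int) f => d.insert f (d.getD f 0 + 1)) PySem.Dict.empty
  let res := (PySem.List.sorted bucket.keys (fun x => x) true).foldl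
    (fun (st : Int × Int × Bool) f =>
      if st.2.2 then st
      else if st.1 ≤ 0 then (st.1, st.2.1, true)
      else
        let m := bucket.getD f 0
        let need := PySem.Int.floordiv (st.1 + f - 1) f
        let take := if m < need then m else need
        (st.1 - take * f, st.2.1 + take, false))
    (k, 0, false)
  res.2.1

-- ===== PRECONDITION & SPEC =====
def Spec_solution (k : Int) (tangerine : List Int) (out : Int) : Prop := out = solution_alt k tangerine
instance (k : Int) (tangerine : List Int) (out : Int) : Decidable (Spec_solution k tangerine out) := by unfold Spec_solution; infer_instance

-- ===== CLAIM (what is proved, stated in full; the proofs are below) =====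
def Claim_equal_solution : Prop := ∀ (k : Int) (tangerine : List Int), Dom_solution k tangerine → Spec_solution k tangerine (solution k tangerine)

-- ===== LEMMAS AND PROOFS =====

-- loop bodies of the two ports, named for the proofs
def pvStepA (st : Int × Int × Bool) (p : Int × Int) : Int × Int × Bool :=
  if st.2.2 then st
  else if st.1 ≤ 0 then (st.1, st.2.1, true)
  else (st.1 - p.2, st.2.1 + 1, false)

def pvStepB (bucket : PySem.Dict Int Int) (st : Int × Int × Bool) (f : Int) : Int × Int × Bool :=
  if st.2.2 then st
  else if st.1 ≤ 0 then (st.1, st.2.1, true)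
  else
    let m := bucket.getD f 0
    let need := PySem.Int.floordiv (st.1 + f - 1) f
    let take := if m < need then m else need
    (st.1 - take * f, st.2.1 + take, false)

-- the common abstraction: subtract list elements one by one while k > 0, counting steps
def pvGo : Int → Int → List Int → Int
  | _, cnt, [] => cnt
  | k, cnt, c :: cs => if k ≤ 0 then cnt else pvGo (k - c) (cnt + 1) cs

-- the multiset of counts that B's bucket walk consumes, as an explicit list
def pvFlat (bucket : PySem.Dict Int Int) (ks : List Int) : List Int :=
  (ks.map (fun f => List.replicate (bucket.getD f 0).toNat f)).flatten

theorem pvGo_nonpos (k cnt : Int) (l : List Int) (hk : k ≤ 0) : pvGo k cnt l = cnt := by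
  cases l <;> simp [pvGo, hk]

theorem pvFoldA_done (l : List (Int × Int)) (st : Int × Int × Bool) (h : st.2.2 = true) :
    List.foldl pvStepA st l = st := by
  induction l with
  | nil => rfl
  | cons p l ih => simpa [pvStepA, h] using ih

theorem pvFoldA (l : List (Int × Int)) (k cnt : Int) :
    (List.foldl pvStepA (k, cnt, false) l).2.1 = pvGo k cnt (l.map (fun x => x.2)) := by
  induction l generalizing k cnt with
  | nil => rfl
  | cons p l ih =>
    by_cases hk : k ≤ 0
    · rw [List.foldl_cons, show pvStepA (k, cnt, false) p = (k, cnt, true) from by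
        simp [pvStepA, hk], pvFoldA_done l _ rfl]
      simp [pvGo, hk]
    · rw [List.foldl_cons, show pvStepA (k, cnt, false) p = (k - p.2, cnt + 1, false) from by
        simp [pvStepA, hk]]
      simp [pvGo, hk, ih]

-- evaluation of A's index loop
theorem pvA_loop (NL : List (Int × Int)) (k : Int) :
    ((PySem.List.pyRange 0 (PySem.List.len NL) 1).foldl
      (fun (st : Int × Int × Bool) i =>
        if st.2.2 then st
        else if st.1 ≤ 0 then (st.1, st.2.1, true)
        else (st.1 - (PySem.List.pyGetD NL i (0, 0)).2, st.2.1 + 1, false))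
      (k, 0, false)).2.1 = pvGo k 0 (NL.map (fun x => x.2)) := by
  have h := PySem.List.foldl_pyRange_pyGetD (a := 0) NL ((0 : Int), (0 : Int)) pvStepA
    (k, 0, false) le_rfl
  rw [Int.toNat_zero, List.drop_zero] at h
  exact (congrArg (fun r => r.2.1) h).trans (pvFoldA NL k 0)

theorem pvFoldB_done (b : PySem.Dict Int Int) (l : List Int) (st : Int × Int × Bool)
    (h : st.2.2 = true) : List.foldl (pvStepB b) st l = st := by
  induction l with
  | nil => rfl
  | cons f l ih => simpa [pvStepB, h] using ih

theorem pvFoldB_nonpos (b : PySem.Dict Int Int) (l : List Int) (k cnt : Int) (hk : k ≤ 0) :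
    (List.foldl (pvStepB b) (k, cnt, false) l).2.1 = cnt := by
  cases l with
  | nil => rfl
  | cons f l =>
    rw [List.foldl_cons, show pvStepB b (k, cnt, false) f = (k, cnt, true) from by
      simp [pvStepB, hk], pvFoldB_done b l _ rfl]

-- the ceiling-division chunk of B consumes exactly a replicate block of pvGo
theorem pvRepl (m : Nat) (f k cnt : Int) (rest : List Int) (hf : 0 < f) (hk : 0 < k) :
    pvGo k cnt (List.replicate m f ++ rest) =
      if (m : Int) < PySem.Int.floordiv (k + f - 1) f
      then pvGo (k - m * f) (cnt + m) rest
      else cnt + PySem.Int.floordiv (k + f - 1) f := by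
  induction m generalizing k cnt with
  | zero =>
    have h1 : (1 : Int) ≤ PySem.Int.floordiv (k + f - 1) f :=
      (PySem.Int.le_floordiv_iff_mul_le hf).mpr (by omega)
    simp only [List.replicate, List.nil_append, Nat.cast_zero]
    rw [if_pos (by omega)]
    norm_num
  | succ m ih =>
    rw [List.replicate_succ, List.cons_append]
    rw [show pvGo k cnt (f :: (List.replicate m f ++ rest)) =
      pvGo (k - f) (cnt + 1) (List.replicate m f ++ rest) from by simp [pvGo]; omega]
    by_cases hkf : k - f ≤ 0
    · have hq1 : (1 : Int) ≤ PySem.Int.floordiv (k + f - 1) f :=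
        (PySem.Int.le_floordiv_iff_mul_le hf).mpr (by omega)
      have hq2 : PySem.Int.floordiv (k + f - 1) f < 2 :=
        (PySem.Int.floordiv_lt_iff_lt_mul hf).mpr (by omega)
      rw [pvGo_nonpos _ _ _ hkf, if_neg (by push_cast; omega)]
      omega
    · have hstep : PySem.Int.floordiv (k + f - 1) f
          = PySem.Int.floordiv (k - f + f - 1) f + 1 := by
        rw [PySem.Int.floordiv_eq_ediv_of_pos hf, PySem.Int.floordiv_eq_ediv_of_pos hf]
        have : k + f - 1 = (k - f + f - 1) + 1 * f := by ring
        rw [this, Int.add_mul_ediv_right _ _ (by omega)]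
      rw [ih (k - f) (cnt + 1) (by omega), hstep]
      by_cases hlt : (m : Int) < PySem.Int.floordiv (k - f + f - 1) f
      · rw [if_pos hlt, if_pos (by push_cast; omega)]
        have harg : k - f - m * f = k - (m + 1 : Nat) * f := by push_cast; ring
        have hcnt : cnt + 1 + (m : Int) = cnt + ((m + 1 : Nat) : Int) := by push_cast; ring
        rw [harg, hcnt]
      · rw [if_neg hlt, if_neg (by push_cast; omega)]
        omega

-- evaluation of B's bucket loop
theorem pvB_loop (b : PySem.Dict Int Int) (ks : List Int) (k cnt : Int)
    (hf : ∀ f ∈ ks, 0 < f) (hm : ∀ f ∈ ks, 0 ≤ b.getD f 0) :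
    (List.foldl (pvStepB b) (k, cnt, false) ks).2.1 = pvGo k cnt (pvFlat b ks) := by
  induction ks generalizing k cnt with
  | nil => rfl
  | cons f ks ih =>
    have hf0 : 0 < f := hf f (by simp)
    have hm0 : (0 : Int) ≤ b.getD f 0 := hm f (by simp)
    have hrecf : ∀ g ∈ ks, 0 < g := fun g hg => hf g (by simp [hg])
    have hrecm : ∀ g ∈ ks, (0 : Int) ≤ b.getD g 0 := fun g hg => hm g (by simp [hg])
    by_cases hk : k ≤ 0
    · rw [List.foldl_cons, show pvStepB b (k, cnt, false) f = (k, cnt, true) from by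
        simp [pvStepB, hk], pvFoldB_done b ks _ rfl]
      simp [pvFlat, pvGo_nonpos _ _ _ hk]
    · have hcast : ((b.getD f 0).toNat : Int) = b.getD f 0 := Int.toNat_of_nonneg hm0
      have hflat : pvFlat b (f :: ks)
          = List.replicate (b.getD f 0).toNat f ++ pvFlat b ks := by
        simp [pvFlat]
      rw [hflat, pvRepl _ _ _ _ _ hf0 (by omega), hcast]
      have hq1 : PySem.Int.floordiv (k + f - 1) f * f ≤ k + f - 1 :=
        (PySem.Int.le_floordiv_iff_mul_le hf0).mp le_rfl
      have hq2 : k + f - 1 < (PySem.Int.floordiv (k + f - 1) f + 1) * f :=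
        (PySem.Int.floordiv_lt_iff_lt_mul hf0).mp (by omega)
      by_cases hlt : b.getD f 0 < PySem.Int.floordiv (k + f - 1) f
      · rw [if_pos hlt, List.foldl_cons,
          show pvStepB b (k, cnt, false) f
            = (k - b.getD f 0 * f, cnt + b.getD f 0, false) from by
          simp only [pvStepB]; rw [if_neg (by simp), if_neg (by omega), if_pos hlt],
          ih _ _ hrecf hrecm]
      · rw [if_neg hlt, List.foldl_cons,
          show pvStepB b (k, cnt, false) f
            = (k - PySem.Int.floordiv (k + f - 1) f * f,
               cnt + PySem.Int.floordiv (k + f - 1) f, false) from by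
          simp only [pvStepB]; rw [if_neg (by simp), if_neg (by omega), if_neg hlt],
          pvFoldB_nonpos b ks _ _ (by nlinarith)]

-- the two loop bodies of the counting pass agree on every dict, so A's dict is Counter
theorem pvStepDictA :
    (fun (d : PySem.Dict Int Int) t =>
      if d.contains t then d.modify t 0 (· + 1) else d.insert t 1)
    = fun (d : PySem.Dict Int Int) t => d.modify t 0 (· + 1) := by
  funext d t
  by_cases h : d.contains t
  · simp [h]
  · have h' : d.contains t = false := by simpa using h
    simp only [h', Bool.false_eq_true, if_false, PySem.Dict.modify,
      PySem.Dict.getD_of_not_contains d 0 h']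
    norm_num

-- every value of a Counter is a positive count
theorem pvValuesPos (xs : List Int) (v : Int) (hv : v ∈ (PySem.Dict.counter xs).values) :
    0 < v := by
  have : (PySem.Dict.counter xs).values
      = (PySem.Set.ofList xs).map (fun c => ((List.count c xs : Int))) := by
    simp only [PySem.Dict.values, PySem.Dict.items_counter, List.map_map]
    rfl
  rw [this] at hv
  obtain ⟨c, hc, rfl⟩ := List.mem_map.mp hv
  have : c ∈ xs := (PySem.Set.mem_ofList xs c).mp hc
  exact_mod_cast List.count_pos_iff.mpr this

-- count of any value in the flattened bucket walk (keys Nodup)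
theorem pvCount_pvFlat (b : PySem.Dict Int Int) (ks : List Int) (hnd : ks.Nodup) (a : Int) :
    List.count a (pvFlat b ks) = if a ∈ ks then (b.getD a 0).toNat else 0 := by
  induction ks with
  | nil => simp [pvFlat]
  | cons f ks ih =>
    have hnd' : ks.Nodup := hnd.of_cons
    have hflat : pvFlat b (f :: ks)
        = List.replicate (b.getD f 0).toNat f ++ pvFlat b ks := by simp [pvFlat]
    rw [hflat, List.count_append, List.count_replicate, ih hnd']
    by_cases haf : a = f
    · subst haf
      have : a ∉ ks := (List.nodup_cons.mp hnd).1
      simp [this]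
    · simp [haf, Ne.symm haf, beq_iff_eq]

-- pvFlat over the sorted distinct frequencies is a permutation of the counts list
theorem pvFlat_perm (vs : List Int)
    (b : PySem.Dict Int Int) (hb : ∀ a, b.getD a 0 = (List.count a vs : Int))
    (ks : List Int) (hnd : ks.Nodup) (hks : ∀ a, a ∈ ks ↔ a ∈ vs) :
    (pvFlat b ks).Perm vs := by
  rw [List.perm_iff_count]
  intro a
  rw [pvCount_pvFlat b ks hnd a]
  by_cases ha : a ∈ ks
  · rw [if_pos ha, hb a, Int.toNat_natCast]
  · rw [if_neg ha, Eq.comm, List.count_eq_zero]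
    exact fun h => ha ((hks a).mpr h)

-- pvFlat over a descending key list is descending
theorem pvFlat_pairwise (b : PySem.Dict Int Int) (ks : List Int)
    (h : ks.Pairwise (fun x y => y ≤ x)) :
    (pvFlat b ks).Pairwise (fun x y => y ≤ x) := by
  rw [pvFlat, List.pairwise_flatten]
  refine ⟨?_, ?_⟩
  · intro l hl
    obtain ⟨f, _, rfl⟩ := List.mem_map.mp hl
    exact List.pairwise_replicate.mpr (Or.inr le_rfl)
  · rw [List.pairwise_map]
    refine h.imp_of_mem ?_
    intro x y _ _ hxy u hu w hw
    rw [List.eq_of_mem_replicate hu, List.eq_of_mem_replicate hw]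
    exact hxy

theorem pv_main (k : Int) (tang : List Int) : solution k tang = solution_alt k tang := by
  simp only [solution, solution_alt]
  rw [pvStepDictA, ← PySem.Dict.counter_eq_foldl,
    PySem.Dict.foldl_insert_getD_add_one_eq_counter tang,
    PySem.Dict.foldl_insert_getD_add_one_eq_counter]
  set C := PySem.Dict.counter tang with hC
  set vs := C.values with hvs
  set b := PySem.Dict.counter vs with hbdef
  set ks := PySem.List.sorted b.keys (fun x => x) true with hks
  -- facts about the bucket dict
  have hbget : ∀ a, b.getD a 0 = (List.count a vs : Int) := fun a =>
    PySem.Dict.getD_counter vs a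
  have hksmem : ∀ a, a ∈ ks ↔ a ∈ vs := by
    intro a
    rw [hks, PySem.List.mem_sorted, hbdef, PySem.Dict.keys_counter]
    exact PySem.Set.mem_ofList vs a
  have hksnd : ks.Nodup := by
    have h1 : b.keys.Nodup := by rw [hbdef]; exact PySem.Dict.nodup_keys_counter vs
    exact ((PySem.List.sorted_perm b.keys (fun x => x) true).nodup_iff).mpr h1
  -- evaluate both loops to pvGo
  rw [pvA_loop]
  show pvGo k 0 (List.map (fun x => x.2) (PySem.List.sorted C.items (fun x => x.2) true))
      = (List.foldl (pvStepB b) (k, 0, false) ks).2.1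
  rw [pvB_loop b ks k 0
    (fun f hf => pvValuesPos tang f ((hksmem f).mp hf))
    (fun f _ => by rw [hbget]; exact_mod_cast Nat.zero_le _)]
  -- the two consumed lists are equal: both descending permutations of vs
  have hpermA : ((PySem.List.sorted C.items (fun x => x.2) true).map (fun x => x.2)).Perm vs :=
    (PySem.List.sorted_perm C.items (fun x => x.2) true).map (fun x => x.2)
  have hpermB : (pvFlat b ks).Perm vs := pvFlat_perm vs b hbget ks hksnd hksmem
  have hpwA : ((PySem.List.sorted C.items (fun x => x.2) true).map (fun x => x.2)).Pairwise
      (fun x y => y ≤ x) := by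
    rw [List.pairwise_map]
    exact PySem.List.sorted_pairwise_rev C.items (fun x => x.2)
  have hpwB : (pvFlat b ks).Pairwise (fun x y => y ≤ x) :=
    pvFlat_pairwise b ks (by
      have := PySem.List.sorted_pairwise_rev b.keys (fun x => x)
      simpa using this)
  have heq : (PySem.List.sorted C.items (fun x => x.2) true).map (fun x => x.2)
      = pvFlat b ks :=
    List.Perm.eq_of_pairwise (fun a c _ _ h1 h2 => le_antisymm h2 h1) hpwA hpwB
      (hpermA.trans hpermB.symm)
  rw [heq]

-- ===== VERDICT (by name: the statement is the Claim_ definition above) =====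
theorem solution_spec : Claim_equal_solution := by
  intro k tang _
  unfold Spec_solution
  exact pv_main k tang
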